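-- pv_equiv track=rewrite | github.com/clover3/Chair | src/trainer_v2/per_project/transparency/mmp/probe/runner/dev_predict_candidate_term_pairs.py | get_q_term_loc_iter
-- ===== SOURCE A (Python) =====
-- def get_q_term_loc_iter(input_ids):
--     CLS_ID = 101
--     SEP_ID = 102
--     for i in range(len(input_ids)):
--         if i == 0:
--             assert input_ids[i] == CLS_ID
--         else:
--             if input_ids[i] == SEP_ID:
--                 return
--             else:
--                 yield i
-- ===== SOURCE B (Python) =====
-- def get_q_term_loc_iter(input_ids):
--     # Boundary-search then emit a range, instead of A's per-element scan-and-branch.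
--     if not input_ids:
--         return
--     assert input_ids[0] == 101
--     try:
--         boundary = input_ids.index(102, 1)
--     except ValueError:
--         boundary = len(input_ids)
--     yield from range(1, boundary)
-- ===== Notes on version B (the rewrite author's own statement) =====
-- stated objective: idiomatic
-- what changed: A scans index by index, branching per element and yielding as it goes; B first locates the SEP boundary with list.index (falling back to len) and then yields range(1, boundary) in one step.
import Mathlib
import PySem

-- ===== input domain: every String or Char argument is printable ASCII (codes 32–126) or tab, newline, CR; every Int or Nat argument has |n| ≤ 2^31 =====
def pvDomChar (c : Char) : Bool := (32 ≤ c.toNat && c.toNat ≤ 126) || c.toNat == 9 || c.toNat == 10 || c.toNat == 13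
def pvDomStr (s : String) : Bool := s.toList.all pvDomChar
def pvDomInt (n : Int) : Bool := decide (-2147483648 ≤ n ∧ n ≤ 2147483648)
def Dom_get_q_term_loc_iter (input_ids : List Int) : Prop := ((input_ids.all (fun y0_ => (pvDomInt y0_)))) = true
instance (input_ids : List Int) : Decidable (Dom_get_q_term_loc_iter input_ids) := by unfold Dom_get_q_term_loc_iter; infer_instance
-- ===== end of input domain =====

-- B locates the SEP boundary first (list.index with fallback len) and emits range(1, boundary),
-- instead of A's per-element scan-and-branch; objective: idiomatic, same cost.


-- ===== PORT A =====
-- A's for-loop over range(len(input_ids)): the i = 0 step only asserts (the assert holds under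
-- Pre_, so the port just moves on); from i = 1 on it stops at SEP (102) or yields i.
def goA_get_q_term_loc_iter (ids : List Int) (i : Nat) : List Int :=
  if h : i < ids.length then
    if i = 0 then goA_get_q_term_loc_iter ids (i + 1)
    else if ids[i] = 102 then []
    else (i : Int) :: goA_get_q_term_loc_iter ids (i + 1)
  else []
termination_by ids.length - i

def get_q_term_loc_iter (input_ids : List Int) : List Int :=
  goA_get_q_term_loc_iter input_ids 0

-- ===== PORT B =====
-- input_ids.index(102, 1) = search in input_ids.drop 1, absolute index = j + 1; except ValueError → len.
def get_q_term_loc_iter_alt (input_ids : List Int) : List Int :=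
  if input_ids.isEmpty then []
  else
    let boundary : Int :=
      match PySem.List.index? (input_ids.drop 1) 102 with
      | some j => (j : Int) + 1
      | none => (input_ids.length : Int)
    PySem.List.pyRange 1 boundary 1

-- ===== PRECONDITION & SPEC =====
-- Pre_ excludes exactly the inputs where Python A raises: a nonempty list whose first
-- element is not 101 makes A's assert fail (B's assert fails identically there).
def Pre_get_q_term_loc_iter (input_ids : List Int) : Prop :=
  input_ids = [] ∨ input_ids.head? = some 101
instance (input_ids : List Int) : Decidable (Pre_get_q_term_loc_iter input_ids) := by
  unfold Pre_get_q_term_loc_iter; infer_instance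

def pvWitness_get_q_term_loc_iter : List Int := [101, 5, 102, 7]

def Spec_get_q_term_loc_iter (input_ids : List Int) (out : List Int) : Prop := out = get_q_term_loc_iter_alt input_ids
instance (input_ids : List Int) (out : List Int) : Decidable (Spec_get_q_term_loc_iter input_ids out) := by unfold Spec_get_q_term_loc_iter; infer_instance

-- ===== CLAIM (what is proved, stated in full; the proofs are below) =====
def Claim_equal_get_q_term_loc_iter : Prop := ∀ (input_ids : List Int), Dom_get_q_term_loc_iter input_ids → Pre_get_q_term_loc_iter input_ids → Spec_get_q_term_loc_iter input_ids (get_q_term_loc_iter input_ids)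

-- ===== LEMMAS AND PROOFS =====

-- first index of 102 in l, or l.length when absent
def pvBnd (l : List Int) : Nat :=
  match PySem.List.index? l 102 with
  | some j => j
  | none => l.length

theorem pvBnd_nil : pvBnd [] = 0 := by simp [pvBnd, PySem.List.index?]

theorem pvBnd_cons (x : Int) (t : List Int) :
    pvBnd (x :: t) = if x = 102 then 0 else pvBnd t + 1 := by
  unfold pvBnd
  by_cases h : x = 102
  · subst h; rw [PySem.List.index?_cons_self]; simp
  · rw [PySem.List.index?_cons_of_ne t h]
    cases hidx : PySem.List.index? t 102 <;> simp [h]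

theorem goA_eq_pyRange (ids : List Int) (i : Nat) (hi : 1 ≤ i) :
    goA_get_q_term_loc_iter ids i
      = PySem.List.pyRange (i : Int) ((i + pvBnd (ids.drop i) : Nat) : Int) 1 := by
  rw [goA_get_q_term_loc_iter]
  by_cases h : i < ids.length
  · have hi0 : i ≠ 0 := by omega
    rw [dif_pos h, if_neg hi0, List.drop_eq_getElem_cons h, pvBnd_cons]
    by_cases h102 : ids[i] = 102
    · rw [if_pos h102, if_pos h102]
      rw [PySem.List.pyRange_one_eq_nil (by push_cast; omega)]
    · rw [if_neg h102, if_neg h102]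
      have e1 : ((i + (pvBnd (ids.drop (i + 1)) + 1) : Nat) : Int)
              = ((i + 1 + pvBnd (ids.drop (i + 1)) : Nat) : Int) := by push_cast; ring
      rw [e1, PySem.List.pyRange_one_cons (by push_cast; omega)]
      congr 1
      rw [goA_eq_pyRange ids (i + 1) (by omega)]
      norm_cast
  · have hd : ids.drop i = [] := List.drop_eq_nil_of_le (by omega)
    rw [dif_neg h, hd, pvBnd_nil]
    rw [PySem.List.pyRange_one_eq_nil (by push_cast; omega)]
termination_by ids.length - i

-- ===== VERDICT (by name: the statement is the Claim_ definition above) =====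
theorem get_q_term_loc_iter_spec : Claim_equal_get_q_term_loc_iter := by
  intro input_ids _ _
  unfold Spec_get_q_term_loc_iter get_q_term_loc_iter get_q_term_loc_iter_alt
  cases input_ids with
  | nil => simp [goA_get_q_term_loc_iter]
  | cons x t =>
    rw [goA_get_q_term_loc_iter]
    rw [dif_pos (by simp : 0 < (x :: t).length), if_pos rfl]
    rw [goA_eq_pyRange (x :: t) 1 le_rfl]
    have hd : (x :: t).drop 1 = t := rfl
    rw [hd, if_neg (by simp)]
    unfold pvBnd
    cases hidx : PySem.List.index? t 102 with
    | some j => congr 1 <;> push_cast <;> omega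
    | none => congr 1 <;> push_cast [List.length_cons] <;> omega
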